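-- pv_equiv track=rewrite | github.com/costas-basdekis/advent-of-code-submissions | year_2018/day_21/part_a.py | get_acceptable_a
-- ===== SOURCE A (Python) =====
-- def get_acceptable_a(start=0):
--     """
--     >>> get_acceptable_a()
--     11592302
--     """
--     c = start | 65536
--     b = 10605201
--     while True:
--         b = (((b + (c & 255)) & 16777215) * 65899) & 16777215
--         if c < 256:
--             break
--         c = c // 256
--
--     return b
-- ===== SOURCE B (Python) =====
-- def _affine(c):
--     # Affine map (m, a) modulo M such that running the hash loop over the
--     # base-256 digits of c starting from b gives (m*b + a) % M.
--     M = 1 << 24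
--     K = 65899
--     d = c & 255
--     if c < 256:
--         m, a = 1, 0
--     else:
--         m, a = _affine(c >> 8)
--     # compose the recursive map after the single-digit map b -> K*(b+d) mod M
--     return (m * K) % M, (m * K * d + a) % M
--
--
-- def get_acceptable_a(start=0):
--     # Build one affine map modulo M by composing per-digit maps recursively,
--     # then apply it once to the initial hash value.
--     m, a = _affine(start | 65536)
--     return (m * 10605201 + a) % (1 << 24)
-- ===== Notes on version B (the rewrite author's own statement) =====
-- stated objective: alternative
-- what changed: Instead of iteratively hashing each byte, B recursively composes the per-digit affine maps (b maps to K*(b+d) modulo the 24-bit mask) into a single multiplier/offset pair and applies that one affine map to the initial hash value.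
import Mathlib
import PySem

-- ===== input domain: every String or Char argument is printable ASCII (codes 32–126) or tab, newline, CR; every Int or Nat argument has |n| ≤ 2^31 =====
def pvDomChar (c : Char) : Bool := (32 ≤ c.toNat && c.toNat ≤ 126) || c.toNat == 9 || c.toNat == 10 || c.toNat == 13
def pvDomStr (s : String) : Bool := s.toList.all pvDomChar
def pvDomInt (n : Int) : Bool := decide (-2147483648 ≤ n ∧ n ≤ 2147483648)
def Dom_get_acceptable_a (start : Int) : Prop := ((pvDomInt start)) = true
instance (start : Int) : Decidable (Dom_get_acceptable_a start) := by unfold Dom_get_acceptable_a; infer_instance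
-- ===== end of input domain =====

-- B replaces A's iterative per-byte hashing by recursively composing the per-digit affine maps modulo the 24-bit mask into one (multiplier, offset) pair applied once; alternative algorithm, same cost.



-- ===== PORT A =====
-- A's while-True loop: update b from the low byte of c, break when c < 256, else c //= 256.
def pvLoopA (b c : Int) : Int :=
  let b' := PySem.Int.band (PySem.Int.band (b + PySem.Int.band c 255) 16777215 * 65899) 16777215
  if c < 256 then b'
  else pvLoopA b' (PySem.Int.floordiv c 256)
termination_by c.toNat
decreasing_by
  have h256 : PySem.Int.floordiv c 256 = c / 256 :=
    PySem.Int.floordiv_eq_ediv_of_pos (by norm_num)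
  have h1 : c / 256 * 256 <= c := Int.ediv_mul_le c (by norm_num)
  have hnn : 0 <= c / 256 := Int.ediv_nonneg (by omega) (by norm_num)
  have hlt : c / 256 < c := by nlinarith
  rw [h256]; omega

def get_acceptable_a (start : Int) : Int :=
  pvLoopA 10605201 (PySem.Int.bor start 65536)

-- ===== PORT B =====
-- B's _affine: recursively compose per-digit affine maps b -> K*(b+d) modulo the 24-bit mask into one (m, a) pair.
def pvAffine (c : Int) : Int × Int :=
  let d := PySem.Int.band c 255
  let p := if c < 256 then ((1 : Int), (0 : Int)) else pvAffine (c >>> (8 : Nat))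
  (PySem.Int.mod (p.1 * 65899) 16777216, PySem.Int.mod (p.1 * 65899 * d + p.2) 16777216)
termination_by c.toNat
decreasing_by
  have hsh : c >>> (8 : Nat) = c / 256 := by
    rw [Int.shiftRight_eq_div_pow]; norm_num
  have h1 : c / 256 * 256 <= c := Int.ediv_mul_le c (by norm_num)
  have hnn : 0 <= c / 256 := Int.ediv_nonneg (by omega) (by norm_num)
  have hlt : c / 256 < c := by nlinarith
  rw [hsh]; omega

def get_acceptable_a_alt (start : Int) : Int :=
  let p := pvAffine (PySem.Int.bor start 65536)
  PySem.Int.mod (p.1 * 10605201 + p.2) 16777216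

-- ===== PRECONDITION & SPEC =====
def Spec_get_acceptable_a (start : Int) (out : Int) : Prop := out = get_acceptable_a_alt start
instance (start : Int) (out : Int) : Decidable (Spec_get_acceptable_a start out) := by
  unfold Spec_get_acceptable_a; infer_instance

-- ===== CLAIM =====
def Claim_equal_get_acceptable_a : Prop :=
  ∀ (start : Int), Dom_get_acceptable_a start → Spec_get_acceptable_a start (get_acceptable_a start)

-- ===== LEMMAS AND PROOFS =====
theorem pvNatMask8 (n : Nat) : n &&& 255 = n % 256 := by
  have := Nat.and_two_pow_sub_one_eq_mod n 8; norm_num at this; exact this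

theorem pvNatMask24 (n : Nat) : n &&& 16777215 = n % 16777216 := by
  have := Nat.and_two_pow_sub_one_eq_mod n 24; norm_num at this; exact this

theorem pvBandMask255 (a : Int) : PySem.Int.band a 255 = PySem.Int.mod a 256 := by
  rw [PySem.Int.mod_eq_emod_of_pos (by norm_num)]
  unfold PySem.Int.band
  have ht : (255 : Int).toNat = 255 := rfl
  by_cases ha : 0 <= a
  · rw [if_pos ha, if_pos (by norm_num), ht, pvNatMask8]; omega
  · rw [if_neg ha, if_pos (by norm_num), ht, Nat.and_comm, pvNatMask8]; omega

theorem pvBandMask16777215 (a : Int) : PySem.Int.band a 16777215 = PySem.Int.mod a 16777216 := by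
  rw [PySem.Int.mod_eq_emod_of_pos (by norm_num)]
  unfold PySem.Int.band
  have ht : (16777215 : Int).toNat = 16777215 := rfl
  by_cases ha : 0 <= a
  · rw [if_pos ha, if_pos (by norm_num), ht, pvNatMask24]; omega
  · rw [if_neg ha, if_pos (by norm_num), ht, Nat.and_comm, pvNatMask24]; omega

-- A's single hash update equals multiplication modulo the 24-bit mask.
theorem pvStepA_eq (b d : Int) :
    PySem.Int.band (PySem.Int.band (b + d) 16777215 * 65899) 16777215
      = (65899 * (b + d)) % 16777216 := by
  rw [pvBandMask16777215, pvBandMask16777215,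
      PySem.Int.mod_eq_emod_of_pos (by norm_num), PySem.Int.mod_eq_emod_of_pos (by norm_num)]
  conv_rhs => rw [Int.mul_comm, Int.mul_emod]
  rw [Int.mul_emod ((b + d) % 16777216) 65899]
  simp [Int.emod_emod_of_dvd]

theorem pvModAddRight (x y : Int) : (x + y % 16777216) % 16777216 = (x + y) % 16777216 := by
  conv_rhs => rw [Int.add_emod]
  rw [Int.add_emod x (y % 16777216)]
  simp [Int.emod_emod_of_dvd]

theorem pvModMulLeft (x y : Int) : (x % 16777216 * y) % 16777216 = (x * y) % 16777216 := by
  conv_rhs => rw [Int.mul_emod]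
  rw [Int.mul_emod (x % 16777216) y]
  simp [Int.emod_emod_of_dvd]

theorem pvModMulRight (x y : Int) : (x * (y % 16777216)) % 16777216 = (x * y) % 16777216 := by
  conv_rhs => rw [Int.mul_emod]
  rw [Int.mul_emod x (y % 16777216)]
  simp [Int.emod_emod_of_dvd]

-- composing mod-M rewrites used below
theorem pvMulModAdd (m x a : Int) :
    (m * (x % 16777216) + a) % 16777216 = (m * x + a) % 16777216 := by
  rw [Int.add_emod, pvModMulRight, ← Int.add_emod]

theorem pvModMulAdd (x b z : Int) :
    (x % 16777216 * b + z) % 16777216 = (x * b + z) % 16777216 := by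
  rw [Int.add_emod, pvModMulLeft, ← Int.add_emod]

-- The loop of A computes the affine map composed by B.
theorem pvLoopA_eq_affine (c : Int) :
    ∀ b, pvLoopA b c = ((pvAffine c).1 * b + (pvAffine c).2) % 16777216 := by
  induction c using pvAffine.induct with
  | case1 c ih =>
      intro b
      rw [pvLoopA, pvAffine]
      simp only [pvStepA_eq, pvBandMask255,
        PySem.Int.mod_eq_emod_of_pos (show (0:Int) < 16777216 by norm_num),
        PySem.Int.mod_eq_emod_of_pos (show (0:Int) < 256 by norm_num)]
      by_cases h : c < 256
      · simp only [h, if_true]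
        norm_num
        ring_nf
      · simp only [h, if_false]
        have hsh : PySem.Int.floordiv c 256 = c >>> (8 : Nat) := by
          rw [Int.shiftRight_eq_div_pow, PySem.Int.floordiv_eq_ediv_of_pos (by norm_num)]
          norm_num
        rw [hsh, ih h]
        rw [pvMulModAdd, pvModMulAdd, pvModAddRight]
        ring_nf

-- ===== VERDICT =====
theorem get_acceptable_a_spec : Claim_equal_get_acceptable_a := by
  intro start _
  unfold Spec_get_acceptable_a get_acceptable_a get_acceptable_a_alt
  rw [PySem.Int.mod_eq_emod_of_pos (by norm_num)]
  exact pvLoopA_eq_affine _ _
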